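-- pv_equiv track=rewrite | github.com/chengcli/planets | earth/ecmwf/decompose_domain.py | calculate_block_boundaries
-- ===== SOURCE A (Python) =====
-- from typing import Tuple, Dict, List
--
-- def calculate_block_boundaries(
--     n_interior: int,
--     n_blocks: int,
--     nghost: int
-- ) -> List[Tuple[int, int]]:
--     """
--     Calculate start and end indices for each block in one dimension.
--
--     Each block contains:
--     - Interior cells: approximately n_interior / n_blocks
--     - Ghost cells: nghost on each side (overlapping with neighbors)
--
--     The full grid has structure:
--     [ghost_left (nghost) | interior (n_interior) | ghost_right (nghost)]
--     Total cells: nghost + n_interior + nghost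
--
--     For example, with 100 interior cells, 4 blocks, and 3 ghost cells:
--     - Full grid: [0:106] (3 ghost + 100 interior + 3 ghost)
--     - Interior region: [3:103]
--     - Block 0 interior: [3:28] (25 cells)
--     - Block 0 with ghosts: [0:31] (includes left ghosts + interior + right ghosts)
--
--     Args:
--         n_interior: Number of interior cells (without ghost zones)
--         n_blocks: Number of blocks to decompose into
--         nghost: Number of ghost cells on each side
--
--     Returns:
--         List of (start_idx, end_idx) tuples for each block
--         Indices are in the full grid (including original ghost zones)
--     """
--     # Calculate interior cells per block
--     cells_per_block = n_interior // n_blocks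
--     remainder = n_interior % n_blocks
--
--     # Distribute remainder cells to first blocks
--     block_sizes = [cells_per_block + (1 if i < remainder else 0)
--                    for i in range(n_blocks)]
--
--     # Calculate boundaries for the interior part of each block
--     # These are positions in the interior-only coordinate system [0, n_interior)
--     interior_starts = []
--     pos = 0
--     for size in block_sizes:
--         interior_starts.append(pos)
--         pos += size
--
--     # Convert to full grid indices
--     full_boundaries = []
--     for i in range(n_blocks):
--         # Interior start and end in the interior coordinate system
--         int_start = interior_starts[i]
--         int_end = int_start + block_sizes[i]
--
--         # Convert to full grid coordinates
--         # Interior region in full grid: [nghost, nghost + n_interior)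
--         # So interior position p maps to full grid position nghost + p
--
--         # Start of block (including left ghosts)
--         full_start = nghost + int_start - nghost  # = int_start
--         # But first block starts at 0 to include original left ghosts
--         if i == 0:
--             full_start = 0
--
--         # End of block (including right ghosts)
--         full_end = nghost + int_end + nghost  # = int_end + 2*nghost
--         # But last block ends at total size to include original right ghosts
--         if i == n_blocks - 1:
--             full_end = nghost + n_interior + nghost
--
--         full_boundaries.append((full_start, full_end))
--
--     return full_boundaries
-- ===== SOURCE B (Python) =====
-- def calculate_block_boundaries(n_interior, n_blocks, nghost):
--     cells_per_block = n_interior // n_blocks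
--     remainder = n_interior % n_blocks
--     total = nghost + n_interior + nghost
--     boundaries = []
--     for i in range(n_blocks):
--         int_start = i * cells_per_block + min(i, remainder)
--         size = cells_per_block + (1 if i < remainder else 0)
--         int_end = int_start + size
--         full_start = 0 if i == 0 else int_start
--         full_end = total if i == n_blocks - 1 else int_end + 2 * nghost
--         boundaries.append((full_start, full_end))
--     return boundaries
-- ===== Notes on version B (the rewrite author's own statement) =====
-- stated objective: simpler
-- what changed: Replaces A's three passes (block-size list, prefix-sum accumulator loop, boundary loop with list indexing) by a single loop computing each block's interior start with the closed form i*cells_per_block + min(i, remainder).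
import Mathlib
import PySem

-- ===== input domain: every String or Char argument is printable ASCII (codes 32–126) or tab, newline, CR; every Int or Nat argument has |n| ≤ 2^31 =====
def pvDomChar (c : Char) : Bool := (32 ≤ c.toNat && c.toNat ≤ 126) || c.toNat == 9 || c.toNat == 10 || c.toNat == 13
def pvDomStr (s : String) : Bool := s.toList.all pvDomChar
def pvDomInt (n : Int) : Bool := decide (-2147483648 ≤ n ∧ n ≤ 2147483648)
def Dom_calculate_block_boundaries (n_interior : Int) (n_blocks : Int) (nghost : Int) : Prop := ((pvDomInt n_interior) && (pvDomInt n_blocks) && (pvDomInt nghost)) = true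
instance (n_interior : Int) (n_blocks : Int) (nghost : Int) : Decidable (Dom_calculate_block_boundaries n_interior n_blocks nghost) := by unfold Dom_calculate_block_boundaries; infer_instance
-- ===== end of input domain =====

-- B replaces A's three passes (block-size list, prefix-sum accumulator loop, boundary loop)
-- with one loop using the closed form i*cells_per_block + min(i, remainder): simpler, one pass.

-- ===== PORT A =====
def calculate_block_boundaries (n_interior : Int) (n_blocks : Int) (nghost : Int) : List (Int × Int) :=
  let cells_per_block := PySem.Int.floordiv n_interior n_blocks
  let remainder := PySem.Int.mod n_interior n_blocks
  let block_sizes := (PySem.List.pyRange 0 n_blocks 1).map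
    (fun i => cells_per_block + (if i < remainder then 1 else 0))
  let interior_starts :=
    (block_sizes.foldl (fun (st : List Int × Int) size => (st.1 ++ [st.2], st.2 + size))
      (([] : List Int), (0 : Int))).1
  (PySem.List.pyRange 0 n_blocks 1).foldl (fun full_boundaries i =>
    let int_start := PySem.List.pyGetD interior_starts i 0
    let int_end := int_start + PySem.List.pyGetD block_sizes i 0
    let full_start := nghost + int_start - nghost
    let full_start := if i = 0 then 0 else full_start
    let full_end := nghost + int_end + nghost
    let full_end := if i = n_blocks - 1 then nghost + n_interior + nghost else full_end
    full_boundaries ++ [(full_start, full_end)]) []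

-- ===== PORT B =====
def calculate_block_boundaries_alt (n_interior : Int) (n_blocks : Int) (nghost : Int) : List (Int × Int) :=
  let cells_per_block := PySem.Int.floordiv n_interior n_blocks
  let remainder := PySem.Int.mod n_interior n_blocks
  let total := nghost + n_interior + nghost
  (PySem.List.pyRange 0 n_blocks 1).foldl (fun boundaries i =>
    let int_start := i * cells_per_block + min i remainder
    let size := cells_per_block + (if i < remainder then 1 else 0)
    let int_end := int_start + size
    let full_start := if i = 0 then 0 else int_start
    let full_end := if i = n_blocks - 1 then total else int_end + 2 * nghost
    boundaries ++ [(full_start, full_end)]) []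

-- ===== PRECONDITION & SPEC =====
-- Pre_ excludes n_blocks = 0, where Python A raises ZeroDivisionError.
def Pre_calculate_block_boundaries (n_interior : Int) (n_blocks : Int) (nghost : Int) : Prop :=
  n_blocks ≠ 0
instance (n_interior : Int) (n_blocks : Int) (nghost : Int) : Decidable (Pre_calculate_block_boundaries n_interior n_blocks nghost) := by unfold Pre_calculate_block_boundaries; infer_instance
def pvWitness_calculate_block_boundaries : Int × Int × Int := (100, 4, 3)

def Spec_calculate_block_boundaries (n_interior : Int) (n_blocks : Int) (nghost : Int) (out : List (Int × Int)) : Prop := out = calculate_block_boundaries_alt n_interior n_blocks nghost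
instance (n_interior : Int) (n_blocks : Int) (nghost : Int) (out : List (Int × Int)) : Decidable (Spec_calculate_block_boundaries n_interior n_blocks nghost out) := by unfold Spec_calculate_block_boundaries; infer_instance

-- ===== CLAIM (what is proved, stated in full; the proofs are below) =====
def Claim_equal_calculate_block_boundaries : Prop := ∀ (n_interior : Int) (n_blocks : Int) (nghost : Int), Dom_calculate_block_boundaries n_interior n_blocks nghost → Pre_calculate_block_boundaries n_interior n_blocks nghost → Spec_calculate_block_boundaries n_interior n_blocks nghost (calculate_block_boundaries n_interior n_blocks nghost)

-- ===== LEMMAS AND PROOFS =====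

-- The prefix-sum accumulator loop of A produces the list of partial sums.
theorem pvScanFst (l : List Int) (acc : List Int) (p : Int) :
    (l.foldl (fun (st : List Int × Int) size => (st.1 ++ [st.2], st.2 + size)) (acc, p)).1
      = acc ++ (List.range l.length).map (fun k => p + ((l.take k).sum)) := by
  induction l generalizing acc p with
  | nil => simp
  | cons x xs ih =>
      simp only [List.foldl_cons, ih, List.length_cons, List.range_succ_eq_map, List.map_cons,
        List.map_map]
      simp [Function.comp, List.append_assoc]
      intro k _
      ring

-- Closed form for the partial sums of the block-size list.
theorem pvTakeSum (cpb rem : Int) (hrem : 0 ≤ rem) (k : Nat) :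
    (((List.range k).map (fun (j : Nat) => cpb + (if (j : Int) < rem then (1:Int) else 0))).sum)
      = (k : Int) * cpb + min (k : Int) rem := by
  induction k with
  | zero => simp; omega
  | succ k ih =>
      rw [List.range_succ, List.map_append, List.sum_append]
      simp only [List.map_cons, List.map_nil, List.sum_cons, List.sum_nil, ih]
      push_cast
      have hmul : ((k:Int)+1)*cpb = (k:Int)*cpb + cpb := by ring
      rw [hmul]
      split_ifs with h <;> omega

-- ===== VERDICT (by name) =====
theorem calculate_block_boundaries_spec : Claim_equal_calculate_block_boundaries := by
  intro n_interior n_blocks nghost _ hpre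
  unfold Spec_calculate_block_boundaries
  unfold calculate_block_boundaries calculate_block_boundaries_alt
  simp only [PySem.List.foldl_append_singleton_eq_map, List.nil_append]
  apply List.map_congr_left
  intro i hi
  rw [PySem.List.mem_pyRange_one] at hi
  obtain ⟨hi0, hin⟩ := hi
  have hnpos : 0 < n_blocks := lt_of_le_of_lt hi0 hin
  set cpb := PySem.Int.floordiv n_interior n_blocks with hcpb
  set rem := PySem.Int.mod n_interior n_blocks with hrem
  have hrem0 : 0 ≤ rem := by
    rw [hrem, PySem.Int.mod_eq_emod_of_pos hnpos]
    exact Int.emod_nonneg _ (by omega)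
  have hbs : PySem.List.pyGetD
      ((PySem.List.pyRange 0 n_blocks 1).map (fun j => cpb + (if j < rem then (1:Int) else 0))) i 0
      = cpb + (if i < rem then (1:Int) else 0) :=
    PySem.List.pyGetD_map_pyRange_of_nonneg _ n_blocks i 0 hi0 hin
  have hblock : ((PySem.List.pyRange 0 n_blocks 1).map (fun j => cpb + (if j < rem then (1:Int) else 0)))
      = (List.range n_blocks.toNat).map (fun (k : Nat) => cpb + (if (k : Int) < rem then (1:Int) else 0)) := by
    rw [PySem.List.pyRange_one]
    simp [List.map_map, Function.comp]
  have hstart : PySem.List.pyGetD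
      (((((PySem.List.pyRange 0 n_blocks 1).map
          (fun j => cpb + (if j < rem then (1:Int) else 0))).foldl
        (fun (st : List Int × Int) size => (st.1 ++ [st.2], st.2 + size))
        (([] : List Int), (0 : Int)))).1) i 0
      = i * cpb + min i rem := by
    rw [hblock, pvScanFst, List.nil_append]
    have hlen : ((List.range n_blocks.toNat).map
        (fun (k : Nat) => cpb + (if (k : Int) < rem then (1:Int) else 0))).length = n_blocks.toNat := by
      simp
    rw [hlen]
    rw [PySem.List.pyGetD_eq_getElem _ _ hi0 (by simp; omega)]
    have hidx : i.toNat < n_blocks.toNat := by omega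
    rw [List.getElem_map, List.getElem_range]
    rw [← List.map_take, List.take_range, Nat.min_eq_left (le_of_lt hidx)]
    rw [pvTakeSum cpb rem hrem0 i.toNat]
    have hcast : ((i.toNat : Nat) : Int) = i := by omega
    rw [hcast]
    ring
  rw [hbs, hstart]
  split_ifs with h0 hl hl <;> simp <;> ring
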